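-- pv_equiv track=rewrite | github.com/omelkonian/LoLa | dyck/grammars.py | is_ordered_single
-- ===== SOURCE A (Python) =====
-- def is_ordered_single(symbols, order):
--     for i, o in enumerate(order):
--         for j, symbol in enumerate(symbols):
--             if symbol == o:
--                 return is_ordered_single(symbols[j+1:], order[i+1:])
--             if symbol != o and symbol in order:
--                 return False
--     return True
-- ===== SOURCE B (Python) =====
-- def is_ordered_single(symbols, order):
--     # One left-to-right pass: pointer k into order, multiset of remaining order elements.
--     remaining = {}
--     for o in order:
--         remaining[o] = remaining.get(o, 0) + 1
--     k = 0
--     for s in symbols: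
--         if remaining.get(s, 0) > 0:
--             if s == order[k]:
--                 remaining[s] -= 1
--                 k += 1
--             else:
--                 return False
--     return True
-- ===== Notes on version B (the rewrite author's own statement) =====
-- stated objective: faster
-- what changed: Replaced the recursive rescan (each match restarts nested scans over sliced copies of both lists) by a single left-to-right pass over symbols with a pointer into order and a count-map of the remaining order elements.
import Mathlib
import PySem

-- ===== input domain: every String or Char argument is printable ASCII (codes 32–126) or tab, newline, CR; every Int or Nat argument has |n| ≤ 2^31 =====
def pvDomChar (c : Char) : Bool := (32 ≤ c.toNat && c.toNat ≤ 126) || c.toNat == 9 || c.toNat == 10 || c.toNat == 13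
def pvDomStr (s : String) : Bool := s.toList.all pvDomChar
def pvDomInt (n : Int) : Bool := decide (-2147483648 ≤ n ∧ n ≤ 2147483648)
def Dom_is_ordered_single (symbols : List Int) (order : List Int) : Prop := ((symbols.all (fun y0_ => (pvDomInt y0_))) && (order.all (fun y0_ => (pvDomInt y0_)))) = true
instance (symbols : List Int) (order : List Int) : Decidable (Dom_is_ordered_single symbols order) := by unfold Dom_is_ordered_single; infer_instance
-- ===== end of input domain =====

-- B replaces A's recursive rescan over sliced copies of both lists by a single
-- left-to-right pass with a pointer into `order` and a count-map of the remaining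
-- order elements (measured faster at the large sizes).

-- ===== PORT A =====
-- inner `for j, symbol in enumerate(symbols)` loop: first early return wins.
-- `some (some j)` = `return is_ordered_single(symbols[j+1:], order[i+1:])` at index j,
-- `some none` = `return False`, `none` = the loop fell through.
def isoInner (o : Int) (order : List Int) : List (Int × Int) → Option (Option Int)
  | [] => none
  | (j, symbol) :: rest =>
    if symbol == o then some (some j)
    else if symbol != o && order.contains symbol then some none
    else isoInner o order rest

-- A's recursion, with a fuel counter as a totality guard only: each recursive call
-- strictly shortens `order`, so fuel `order.length + 1` is never exhausted.
mutual
def isoGo : Nat → List Int → List Int → Bool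
  | 0, _, _ => true
  | fuel + 1, symbols, order => isoOuter fuel symbols order (PySem.List.enumerate order)
termination_by fuel _ _ => (fuel, 0)

def isoOuter : Nat → List Int → List Int → List (Int × Int) → Bool
  | _, _, _, [] => true
  | fuel, symbols, order, (i, o) :: rest =>
    match isoInner o order (PySem.List.enumerate symbols) with
    | some (some j) =>
        isoGo fuel (PySem.List.slice symbols (some (j + 1)) none)
                   (PySem.List.slice order (some (i + 1)) none)
    | some none => false
    | none => isoOuter fuel symbols order rest
termination_by fuel _ _ pairs => (fuel, pairs.length + 1)
end

def is_ordered_single (symbols : List Int) (order : List Int) : Bool :=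
  isoGo (order.length + 1) symbols order

-- ===== PORT B =====
-- the `for s in symbols` loop of Source B, state = (remaining count-map, pointer k)
def altLoop (order : List Int) : List Int → PySem.Dict Int Int → Nat → Bool
  | [], _, _ => true
  | s :: rest, remaining, k =>
    if remaining.getD s 0 > 0 then
      if some s == PySem.List.pyGet? order (k : Int) then
        altLoop order rest (remaining.insert s (remaining.getD s 0 - 1)) (k + 1)
      else false
    else altLoop order rest remaining k

def is_ordered_single_alt (symbols : List Int) (order : List Int) : Bool :=
  let remaining := order.foldl (fun d o => d.insert o (d.getD o 0 + 1)) PySem.Dict.empty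
  altLoop order symbols remaining 0

-- ===== PRECONDITION & SPEC =====
def Spec_is_ordered_single (symbols : List Int) (order : List Int) (out : Bool) : Prop := out = is_ordered_single_alt symbols order
instance (symbols : List Int) (order : List Int) (out : Bool) : Decidable (Spec_is_ordered_single symbols order out) := by unfold Spec_is_ordered_single; infer_instance

-- ===== CLAIM (what is proved, stated in full; the proofs are below) =====
def Claim_equal_is_ordered_single : Prop := ∀ (symbols : List Int) (order : List Int), Dom_is_ordered_single symbols order → Spec_is_ordered_single symbols order (is_ordered_single symbols order)

-- ===== LEMMAS AND PROOFS =====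

-- common reference function: both programs check the subsequence of symbols lying in
-- the current order against the order, one symbol at a time
def refOrd : List Int → List Int → Bool
  | _, [] => true
  | [], _ => true
  | s :: rest, o :: os =>
    if s = o then refOrd rest os
    else if s ∈ os then false
    else refOrd rest (o :: os)

lemma refOrd_nil_right (symbols : List Int) : refOrd symbols [] = true := by
  cases symbols <;> rfl

lemma refOrd_true (symbols ord : List Int) (h : ∀ x ∈ symbols, x ∉ ord) :
    refOrd symbols ord = true := by
  induction symbols with
  | nil => cases ord <;> rfl
  | cons s rest ih =>
    cases ord with
    | nil => rfl
    | cons o os =>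
      have hs := h s (by simp)
      simp only [List.mem_cons, not_or] at hs
      rw [refOrd, if_neg hs.1, if_neg hs.2]
      exact ih (fun x hx => h x (by simp [hx]))

lemma isoInner_none_iff (o : Int) (ord : List Int) (symbols : List Int) (st : Int) :
    isoInner o ord (PySem.List.enumerate symbols st) = none ↔
      ∀ x ∈ symbols, x ≠ o ∧ x ∉ ord := by
  induction symbols generalizing st with
  | nil => simp [PySem.List.enumerate_nil, isoInner]
  | cons s rest ih =>
    rw [PySem.List.enumerate_cons]
    by_cases h1 : s = o
    · simp [isoInner, h1]
    · by_cases h2 : s ∈ ord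
      · simp [isoInner, h1, h2]
      · simp only [isoInner, beq_iff_eq, h1, if_false]
        rw [if_neg (by simp [h2]), ih]
        simp [h1, h2]

lemma isoInner_shift (o : Int) (ord : List Int) (symbols : List Int) (st : Int) :
    isoInner o ord (PySem.List.enumerate symbols (st + 1)) =
      (isoInner o ord (PySem.List.enumerate symbols st)).map (Option.map (· + 1)) := by
  induction symbols generalizing st with
  | nil => simp [PySem.List.enumerate_nil, isoInner]
  | cons s rest ih =>
    rw [PySem.List.enumerate_cons, PySem.List.enumerate_cons]
    by_cases h1 : s = o
    · simp [isoInner, h1]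
    · by_cases h2 : s ∈ ord
      · simp [isoInner, h1, h2]
      · simp only [isoInner, beq_iff_eq, h1, if_false]
        rw [if_neg (by simp [h2]), if_neg (by simp [h2])]
        exact ih (st + 1)

lemma isoInner_nonneg (o : Int) (ord : List Int) (symbols : List Int) (st j : Int)
    (h : isoInner o ord (PySem.List.enumerate symbols st) = some (some j)) : st ≤ j := by
  induction symbols generalizing st with
  | nil => simp [PySem.List.enumerate_nil, isoInner] at h
  | cons s rest ih =>
    rw [PySem.List.enumerate_cons] at h
    by_cases h1 : s = o
    · simp [isoInner, h1] at h; omega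
    · by_cases h2 : s ∈ ord
      · simp [isoInner, h1, h2] at h
      · simp only [isoInner, beq_iff_eq, h1, if_false] at h
        rw [if_neg (by simp [h2])] at h
        have := ih (st + 1) h
        omega

lemma isoOuter_none (f : Nat) (symbols ord : List Int) (pairs : List (Int × Int))
    (hs : ∀ x ∈ symbols, x ∉ ord) (hp : ∀ p ∈ pairs, p.2 ∈ ord) :
    isoOuter f symbols ord pairs = true := by
  induction pairs with
  | nil => rw [isoOuter]
  | cons p rest ih =>
    obtain ⟨i, oi⟩ := p
    have hnone : isoInner oi ord (PySem.List.enumerate symbols 0) = none := by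
      rw [isoInner_none_iff]
      intro x hx
      refine ⟨fun hxo => hs x hx ?_, hs x hx⟩
      exact hxo ▸ hp (i, oi) (by simp)
    rw [isoOuter, hnone]
    exact ih (fun p hp' => hp p (by simp [hp']))

lemma core (f : Nat) (o : Int) (os : List Int)
    (IH : ∀ s', isoGo f s' os = refOrd s' os) (symbols : List Int) :
    isoOuter f symbols (o :: os) ((0, o) :: PySem.List.enumerate os 1) =
      refOrd symbols (o :: os) := by
  have hpairs : ∀ p ∈ (PySem.List.enumerate os 1), p.2 ∈ o :: os := by
    intro p hp
    have hmem : p.2 ∈ (PySem.List.enumerate os 1).map (·.2) := List.mem_map_of_mem hp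
    rw [PySem.List.map_snd_enumerate] at hmem
    simp [hmem]
  induction symbols with
  | nil =>
    rw [refOrd_true [] (o :: os) (by simp)]
    apply isoOuter_none
    · simp
    · intro p hp
      rw [List.mem_cons] at hp
      rcases hp with rfl | hp
      · simp
      · exact hpairs p hp
  | cons s rest ih =>
    rw [isoOuter, PySem.List.enumerate_cons]
    by_cases h1 : s = o
    · rw [show isoInner o (o :: os) ((0, s) :: PySem.List.enumerate rest (0 + 1)) =
            some (some 0) from by simp [isoInner, h1]]
      rw [refOrd, if_pos h1, ← IH rest]
      norm_num [PySem.List.slice_from_one]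
    · by_cases h2 : s ∈ o :: os
      · have h2' : s ∈ os := by rcases List.mem_cons.mp h2 with h | h; exact absurd h h1; exact h
        rw [show isoInner o (o :: os) ((0, s) :: PySem.List.enumerate rest (0 + 1)) =
              some none from by simp [isoInner, h1, h2]]
        rw [refOrd, if_neg h1, if_pos h2']
      · have hs2 : s ∉ os := fun hh => h2 (by simp [hh])
        have hstep : isoInner o (o :: os) ((0, s) :: PySem.List.enumerate rest (0 + 1)) =
            isoInner o (o :: os) (PySem.List.enumerate rest (0 + 1)) := by
          rw [isoInner, if_neg (by simp [h1]), if_neg (by simp [h2])]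
        rw [hstep, isoInner_shift]
        rw [isoOuter] at ih
        cases hv : isoInner o (o :: os) (PySem.List.enumerate rest 0) with
        | none =>
          simp only [Option.map_none]
          have hall := (isoInner_none_iff o (o :: os) rest 0).mp hv
          have hall' : ∀ x ∈ s :: rest, x ∉ (o :: os) := by
            intro x hx
            rw [List.mem_cons] at hx
            rcases hx with rfl | hx
            · exact h2
            · exact (hall x hx).2
          rw [refOrd_true (s :: rest) (o :: os) hall']
          exact isoOuter_none f (s :: rest) (o :: os) _ hall' hpairs
        | some v =>
          cases v with
          | none =>
            rw [hv] at ih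
            simp only [Option.map_some, Option.map_none]
            rw [refOrd, if_neg h1, if_neg hs2, ← ih]
          | some j =>
            have hj : (0 : Int) ≤ j := isoInner_nonneg o (o :: os) rest 0 j hv
            rw [hv] at ih
            simp only [Option.map_some]
            have hsl : PySem.List.slice (s :: rest) (some (j + 1 + 1)) none =
                PySem.List.slice rest (some (j + 1)) none := by
              rw [PySem.List.slice_from (s :: rest) (show (0:Int) ≤ j + 1 + 1 by omega),
                PySem.List.slice_from rest (show (0:Int) ≤ j + 1 by omega),
                show (j + 1 + 1).toNat = (j + 1).toNat + 1 from by omega]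
              rfl
            rw [refOrd, if_neg h1, if_neg hs2, ← ih, hsl]

lemma isoGo_eq_refOrd (fuel : Nat) : ∀ (symbols ord : List Int), ord.length < fuel →
    isoGo fuel symbols ord = refOrd symbols ord := by
  induction fuel with
  | zero => intro _ _ h; omega
  | succ f ihf =>
    intro symbols ord h
    cases ord with
    | nil =>
      rw [isoGo, PySem.List.enumerate_nil, isoOuter, refOrd_nil_right]
    | cons o os =>
      rw [isoGo, PySem.List.enumerate_cons]
      exact core f o os (fun s' => ihf s' os (by simp at h ⊢; omega)) symbols

lemma altLoop_eq_refOrd (ord : List Int) (symbols : List Int) : ∀ (k : Nat) (d : PySem.Dict Int Int),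
    (∀ x, d.getD x 0 = ((ord.drop k).count x : Int)) →
    altLoop ord symbols d k = refOrd symbols (ord.drop k) := by
  induction symbols with
  | nil => intro k d _; cases ord.drop k <;> rfl
  | cons s rest ih =>
    intro k d hinv
    have hds := hinv s
    cases hd : ord.drop k with
    | nil =>
      rw [hd] at hds
      simp only [List.count_nil, Int.natCast_zero] at hds
      rw [altLoop, if_neg (by omega), ih k d hinv, hd, refOrd_nil_right, refOrd_nil_right]
    | cons o os =>
      have hk : ord[k]? = some o := by
        have h0 := List.getElem?_drop (xs := ord) (i := k) (j := 0)
        rw [hd] at h0; simpa using h0.symm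
      have hdrop : ord.drop (k + 1) = os := by
        have h0 : (ord.drop k).drop 1 = ord.drop (k + 1) := by rw [List.drop_drop]
        rw [hd] at h0; simpa using h0.symm
      have hget : PySem.List.pyGet? ord (k : Int) = some o := by simp [pysem, hk]
      rw [altLoop]
      by_cases hmem : s ∈ (o :: os)
      · have hpos : d.getD s 0 > 0 := by
          rw [hds, hd]; exact_mod_cast List.count_pos_iff.mpr hmem
        rw [if_pos hpos, hget]
        by_cases hso : s = o
        · rw [if_pos (by simp [hso])]
          have hinv' : ∀ x, (d.insert s (d.getD s 0 - 1)).getD x 0 =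
              ((ord.drop (k + 1)).count x : Int) := by
            intro x
            by_cases hx : x = s
            · subst hx
              rw [PySem.Dict.getD_insert_self, hds, hd, hdrop, hso, List.count_cons]
              simp
            · rw [PySem.Dict.getD_insert_of_ne _ _ _ hx, hinv x, hd, hdrop, List.count_cons]
              have hxo : ¬ (o == x) = true := by
                simp only [beq_iff_eq]
                exact fun h => hx (hso.trans h).symm
              simp [hxo]
          rw [ih (k + 1) _ hinv', hdrop, refOrd, if_pos hso]
        · rw [if_neg (by simp [hso]), refOrd, if_neg hso,
            if_pos ((List.mem_cons.mp hmem).resolve_left hso)]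
      · have hnpos : ¬ d.getD s 0 > 0 := by
          rw [hds, hd, List.count_eq_zero.mpr hmem]
          omega
        rw [if_neg hnpos, ih k d hinv, hd, refOrd,
          if_neg (fun h => hmem (by simp [h])), if_neg (fun h => hmem (by simp [h]))]

-- ===== VERDICT (by name: the statement is the Claim_ definition above) =====
theorem is_ordered_single_spec : Claim_equal_is_ordered_single := by
  intro symbols order _
  unfold Spec_is_ordered_single
  have hA : is_ordered_single symbols order = refOrd symbols order :=
    isoGo_eq_refOrd _ _ _ (by omega)
  have hB : is_ordered_single_alt symbols order = refOrd symbols order := by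
    unfold is_ordered_single_alt
    rw [PySem.Dict.foldl_insert_getD_add_one_eq_counter]
    have h0 := altLoop_eq_refOrd order symbols 0 (PySem.Dict.counter order)
      (fun x => by simp [PySem.Dict.getD_counter])
    simpa using h0
  rw [hA, hB]
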